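-- pv_equiv track=rewrite | github.com/Pixelatory/ManyObjectiveDrugDesign | MTLBERT/DeepFMPO/python3/Modules/build_vocab.py | sss
-- ===== SOURCE A (Python) =====
-- def sss(encoded_smi, model_num2str, smiles_num2str, frag_num2str):
--     """
--         Decodes a molecule using a hybrid SMILES-fragment technique.
--
--         Note: I just used this for testing.
--     """
--     decoded = []
--     idx = 0
--     while idx < len(encoded_smi):
--         token = encoded_smi[idx]
--         if token in model_num2str:
--             decoded.append(model_num2str[token])
--         elif token in frag_num2str:
--             decoded.append(frag_num2str[token])
--         else:
--             decoded.append(smiles_num2str[token])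
--         idx += 1
--
--     return decoded
-- ===== SOURCE B (Python) =====
-- def sss(encoded_smi, model_num2str, smiles_num2str, frag_num2str):
--     """
--         Decodes a molecule using a hybrid SMILES-fragment technique.
--
--         Alternative algorithm: build an inverted index (token -> positions),
--         then iterate over the decode TABLES in increasing priority
--         (smiles, frag, model), scattering each entry's string into every
--         output position holding that token; later tables overwrite earlier
--         ones, reproducing A's precedence.
--     """
--     positions = {}
--     for i, t in enumerate(encoded_smi):
--         positions.setdefault(t, []).append(i)
--     out = [None] * len(encoded_smi)
--     for table in (smiles_num2str, frag_num2str, model_num2str):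
--         for k, v in table.items():
--             for i in positions.get(k, ()):
--                 out[i] = v
--     return out
-- ===== Notes on version B (the rewrite author's own statement) =====
-- stated objective: alternative
-- what changed: B inverts the traversal: it builds an inverted index token->positions once, allocates the output, and iterates over the three decode tables in increasing priority (smiles, frag, model), scattering each entry's string into every position holding that key with later tables overwriting earlier ones, instead of A's per-token three-way dict-membership lookup loop.
import Mathlib
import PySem

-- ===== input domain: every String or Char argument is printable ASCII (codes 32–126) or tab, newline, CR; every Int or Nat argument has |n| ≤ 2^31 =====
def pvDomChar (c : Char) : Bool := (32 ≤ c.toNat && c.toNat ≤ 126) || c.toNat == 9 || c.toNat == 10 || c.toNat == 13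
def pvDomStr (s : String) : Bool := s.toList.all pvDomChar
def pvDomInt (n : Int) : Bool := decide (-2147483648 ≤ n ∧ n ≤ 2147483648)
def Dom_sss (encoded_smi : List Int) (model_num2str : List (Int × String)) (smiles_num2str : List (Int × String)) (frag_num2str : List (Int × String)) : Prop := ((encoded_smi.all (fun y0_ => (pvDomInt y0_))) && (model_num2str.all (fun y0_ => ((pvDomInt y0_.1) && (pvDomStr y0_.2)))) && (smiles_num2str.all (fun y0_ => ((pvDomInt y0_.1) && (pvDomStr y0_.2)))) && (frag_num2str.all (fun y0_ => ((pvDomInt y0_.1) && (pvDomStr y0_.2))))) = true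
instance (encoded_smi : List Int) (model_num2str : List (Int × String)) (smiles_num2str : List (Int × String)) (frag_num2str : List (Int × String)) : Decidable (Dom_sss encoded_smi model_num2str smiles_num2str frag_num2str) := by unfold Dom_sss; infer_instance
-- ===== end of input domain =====

-- ===== PORT A =====
-- B replaces A's per-token three-way lookup loop with a scatter over the three tables in
-- increasing priority; equivalence of the return values is proved below (no mutation is observable).
-- A's while loop, transcribed as recursion over the remaining tokens carrying the `decoded`
-- accumulator. Dict membership/lookup on the association lists is first-match `List.lookup`
-- (the Python dicts have unique keys); in the final branch Python raises KeyError when the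
-- token is also absent from `smiles_num2str` — those inputs are excluded by `Pre_sss`;
-- the port returns "" there.
def sssGo (model_num2str smiles_num2str frag_num2str : List (Int × String)) (toks : List Int) (decoded : List String) : List String :=
  match toks with
  | [] => decoded
  | token :: rest =>
    match List.lookup token model_num2str with
    | some v => sssGo model_num2str smiles_num2str frag_num2str rest (decoded ++ [v])
    | none =>
      match List.lookup token frag_num2str with
      | some v => sssGo model_num2str smiles_num2str frag_num2str rest (decoded ++ [v])
      | none => sssGo model_num2str smiles_num2str frag_num2str rest (decoded ++ [(List.lookup token smiles_num2str).getD ""])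

def sss (encoded_smi : List Int) (model_num2str : List (Int × String)) (smiles_num2str : List (Int × String)) (frag_num2str : List (Int × String)) : List String :=
  sssGo model_num2str smiles_num2str frag_num2str encoded_smi []

-- ===== PORT B =====
-- positions = inverted index token -> list of positions (dict of lists, built with
-- setdefault/append); out = [None]*n; for each table (smiles, frag, model) and each entry (k, v),
-- out[i] = v for every i in positions.get(k, ()). The cell type is Option String (None ↦ none) and
-- the final `.getD ""` totalises the none cells, which Pre_sss makes unreachable (in Python they
-- would remain None). `enumerate` indices are the nonnegative positions, so `.toNat` is exact.
def buildPos (encoded_smi : List Int) : PySem.Dict Int (List Nat) :=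
  (PySem.List.enumerate encoded_smi).foldl
    (fun d p => d.insert p.2 ((d.getD p.2 []) ++ [p.1.toNat])) PySem.Dict.empty

def scatterEntry (pos : PySem.Dict Int (List Nat)) (k : Int) (v : String) (out : List (Option String)) : List (Option String) :=
  (pos.getD k []).foldl (fun o i => o.set i (some v)) out

def scatterTable (pos : PySem.Dict Int (List Nat)) (table : List (Int × String)) (out : List (Option String)) : List (Option String) :=
  table.foldl (fun o p => scatterEntry pos p.1 p.2 o) out

def sss_alt (encoded_smi : List Int) (model_num2str : List (Int × String)) (smiles_num2str : List (Int × String)) (frag_num2str : List (Int × String)) : List String :=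
  let pos := buildPos encoded_smi
  let out0 : List (Option String) := List.replicate encoded_smi.length none
  let out1 := scatterTable pos smiles_num2str out0
  let out2 := scatterTable pos frag_num2str out1
  let out3 := scatterTable pos model_num2str out2
  out3.map (fun o => o.getD "")

-- ===== PRECONDITION & SPEC =====
-- Pre_ excludes (a) inputs with a token absent from all three tables, on which Python A raises
-- KeyError (Python B would return a list containing None there, not a str), and (b) association
-- lists with duplicate keys, which never arise as the items of a Python dict (the actual Python
-- arguments are dicts).
def Pre_sss (encoded_smi : List Int) (model_num2str : List (Int × String)) (smiles_num2str : List (Int × String)) (frag_num2str : List (Int × String)) : Prop :=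
  (model_num2str.map Prod.fst).Nodup ∧ (smiles_num2str.map Prod.fst).Nodup ∧ (frag_num2str.map Prod.fst).Nodup ∧
  ∀ t ∈ encoded_smi, t ∈ model_num2str.map Prod.fst ∨ t ∈ frag_num2str.map Prod.fst ∨ t ∈ smiles_num2str.map Prod.fst
instance (encoded_smi : List Int) (model_num2str : List (Int × String)) (smiles_num2str : List (Int × String)) (frag_num2str : List (Int × String)) : Decidable (Pre_sss encoded_smi model_num2str smiles_num2str frag_num2str) := by unfold Pre_sss; infer_instance
def pvWitness_sss : List Int × (List (Int × String)) × (List (Int × String)) × (List (Int × String)) :=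
  ([1, 2, 3, 1], [(1, "C")], [(3, "O"), (1, "N")], [(2, "c1ccccc1")])
def Spec_sss (encoded_smi : List Int) (model_num2str : List (Int × String)) (smiles_num2str : List (Int × String)) (frag_num2str : List (Int × String)) (out : List String) : Prop := out = sss_alt encoded_smi model_num2str smiles_num2str frag_num2str
instance (encoded_smi : List Int) (model_num2str : List (Int × String)) (smiles_num2str : List (Int × String)) (frag_num2str : List (Int × String)) (out : List String) : Decidable (Spec_sss encoded_smi model_num2str smiles_num2str frag_num2str out) := by unfold Spec_sss; infer_instance

-- ===== CLAIM (what is proved, stated in full; the proofs are below) =====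
def Claim_equal_sss : Prop := ∀ (encoded_smi : List Int) (model_num2str : List (Int × String)) (smiles_num2str : List (Int × String)) (frag_num2str : List (Int × String)), Dom_sss encoded_smi model_num2str smiles_num2str frag_num2str → Pre_sss encoded_smi model_num2str smiles_num2str frag_num2str → Spec_sss encoded_smi model_num2str smiles_num2str frag_num2str (sss encoded_smi model_num2str smiles_num2str frag_num2str)

-- ===== LEMMAS AND PROOFS =====

-- the per-token value both programs compute
def decodeTok (model smiles frag : List (Int × String)) (t : Int) : String :=
  ((List.lookup t model).or ((List.lookup t frag).or (List.lookup t smiles))).getD ""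

theorem sssGo_eq_map (model smiles frag : List (Int × String)) (toks : List Int) (acc : List String) :
    sssGo model smiles frag toks acc = acc ++ toks.map (decodeTok model smiles frag) := by
  induction toks generalizing acc with
  | nil => simp [sssGo]
  | cons t rest ih =>
    cases hml : List.lookup t model with
    | some v => simp [sssGo, hml, ih, decodeTok]
    | none =>
      cases hfl : List.lookup t frag with
      | some v => simp [sssGo, hml, hfl, ih, decodeTok]
      | none => simp [sssGo, hml, hfl, ih, decodeTok]

theorem length_foldl_set (v : String) (L : List Nat) (out : List (Option String)) :
    (L.foldl (fun o i => o.set i (some v)) out).length = out.length := by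
  induction L generalizing out with
  | nil => rfl
  | cons i rest ih => rw [List.foldl_cons, ih]; simp

theorem length_scatterEntry (pos : PySem.Dict Int (List Nat)) (k : Int) (v : String) (out : List (Option String)) :
    (scatterEntry pos k v out).length = out.length := length_foldl_set v _ out

theorem length_scatterTable (pos : PySem.Dict Int (List Nat)) (table : List (Int × String)) (out : List (Option String)) :
    (scatterTable pos table out).length = out.length := by
  induction table generalizing out with
  | nil => rfl
  | cons p rest ih =>
    have h : scatterTable pos (p :: rest) out
        = scatterTable pos rest (scatterEntry pos p.1 p.2 out) := rfl
    rw [h, ih, length_scatterEntry]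

theorem lookup_eq_none_of_not_mem (k : Int) (l : List (Int × String)) (h : k ∉ l.map Prod.fst) :
    List.lookup k l = none := by
  induction l with
  | nil => rfl
  | cons p rest ih =>
    simp only [List.map_cons, List.mem_cons, not_or] at h
    cases hkp : (k == p.1) with
    | false => simp [List.lookup, hkp, ih h.2]
    | true => exact absurd (eq_of_beq hkp) h.1

-- membership in the inverted index built over `enumerate xs s`
theorem mem_buildPos_aux (xs : List Int) (s : Nat) (d : PySem.Dict Int (List Nat)) (k : Int) (j : Nat) :
    (j ∈ ((PySem.List.enumerate xs (s : Int)).foldl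
        (fun d p => d.insert p.2 ((d.getD p.2 []) ++ [p.1.toNat])) d).getD k [])
      ↔ j ∈ d.getD k [] ∨ (s ≤ j ∧ xs[j - s]? = some k) := by
  induction xs generalizing s d with
  | nil => simp
  | cons x rest ih =>
    rw [PySem.List.enumerate_cons, List.foldl_cons]
    have hs1 : ((s : Int) + 1) = ((s + 1 : Nat) : Int) := by push_cast; ring
    rw [hs1, show (((s : Nat) : Int), x).2 = x from rfl,
      show (((s : Nat) : Int), x).1.toNat = s from by simp,
      ih (s + 1), PySem.Dict.getD_insert]
    have hidx1 : ∀ h : s + 1 ≤ j, (x :: rest)[j - s]? = rest[j - s - 1]? := by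
      intro h
      have : j - s = (j - s - 1) + 1 := by omega
      rw [this]; simp
    by_cases hk : k = x
    · subst hk
      rw [if_pos rfl]
      constructor
      · rintro (h | ⟨h1, h2⟩)
        · rcases List.mem_append.mp h with h | h
          · exact Or.inl h
          · have hjs : j = s := List.mem_singleton.mp h
            subst hjs
            exact Or.inr ⟨le_refl j, by simp⟩
        · refine Or.inr ⟨by omega, ?_⟩
          rw [hidx1 h1]
          have he : j - (s + 1) = j - s - 1 := by omega
          rw [← he]; exact h2
      · rintro (h | ⟨h1, h2⟩)
        · exact Or.inl (List.mem_append.mpr (Or.inl h))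
        · by_cases hj : j = s
          · exact Or.inl (List.mem_append.mpr (Or.inr (List.mem_singleton.mpr hj)))
          · have hj1 : s + 1 ≤ j := by omega
            refine Or.inr ⟨hj1, ?_⟩
            have he : j - (s + 1) = j - s - 1 := by omega
            rw [he, ← hidx1 hj1]; exact h2
    · rw [if_neg hk]
      constructor
      · rintro (h | ⟨h1, h2⟩)
        · exact Or.inl h
        · refine Or.inr ⟨by omega, ?_⟩
          rw [hidx1 h1]
          have : j - (s + 1) = j - s - 1 := by omega
          rw [← this]; exact h2
      · rintro (h | ⟨h1, h2⟩)
        · exact Or.inl h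
        · by_cases hj : j = s
          · exfalso
            subst hj
            simp at h2
            exact hk h2.symm
          · have hj1 : s + 1 ≤ j := by omega
            refine Or.inr ⟨hj1, ?_⟩
            have : j - (s + 1) = j - s - 1 := by omega
            rw [this, ← hidx1 hj1]; exact h2

theorem mem_buildPos (encoded : List Int) (k : Int) (j : Nat) :
    (j ∈ (buildPos encoded).getD k []) ↔ encoded[j]? = some k := by
  unfold buildPos
  have h0 : ((0 : Nat) : Int) = (0 : Int) := rfl
  rw [← h0, mem_buildPos_aux encoded 0 PySem.Dict.empty k j]
  simp [PySem.Dict.getD_empty]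

theorem foldl_set_get? (v : String) (L : List Nat) (out : List (Option String))
    (hL : ∀ i ∈ L, i < out.length) (j : Nat) :
    (L.foldl (fun o i => o.set i (some v)) out)[j]? =
      if j ∈ L then some (some v) else out[j]? := by
  induction L generalizing out with
  | nil => simp
  | cons i rest ih =>
    rw [List.foldl_cons, ih _ (fun i' hi' => by
      rw [List.length_set]; exact hL i' (List.mem_cons_of_mem i hi'))]
    by_cases hjr : j ∈ rest
    · simp [hjr]
    · by_cases hji : j = i
      · subst hji
        simp [hjr, hL j (List.mem_cons_self ..)]
      · simp [hjr, hji, Ne.symm hji]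

theorem scatterEntry_get? (encoded : List Int) (k : Int) (v : String) (out : List (Option String))
    (hlen : encoded.length ≤ out.length) (j : Nat) :
    (scatterEntry (buildPos encoded) k v out)[j]? =
      if encoded[j]? = some k then some (some v) else out[j]? := by
  unfold scatterEntry
  rw [foldl_set_get? v _ out (fun i hi => by
    have := (mem_buildPos encoded k i).mp hi
    have hlt : i < encoded.length := (List.getElem?_eq_some_iff.mp this).1
    omega) j]
  by_cases h : encoded[j]? = some k
  · rw [if_pos ((mem_buildPos encoded k j).mpr h), if_pos h]
  · rw [if_neg (fun hm => h ((mem_buildPos encoded k j).mp hm)), if_neg h]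

theorem scatterTable_get? (encoded : List Int) (table : List (Int × String))
    (hnd : (table.map Prod.fst).Nodup) (out : List (Option String))
    (hlen : encoded.length ≤ out.length) (j : Nat) :
    (scatterTable (buildPos encoded) table out)[j]? =
      match encoded[j]? with
      | some t => match List.lookup t table with
                  | some v => some (some v)
                  | none => out[j]?
      | none => out[j]? := by
  induction table generalizing out with
  | nil => cases encoded[j]? <;> simp [scatterTable]
  | cons p rest ih =>
    simp only [List.map_cons, List.nodup_cons] at hnd
    have hlen' : encoded.length ≤ (scatterEntry (buildPos encoded) p.1 p.2 out).length := by
      rw [length_scatterEntry]; exact hlen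
    have h : scatterTable (buildPos encoded) (p :: rest) out
        = scatterTable (buildPos encoded) rest (scatterEntry (buildPos encoded) p.1 p.2 out) := rfl
    rw [h, ih hnd.2 _ hlen', scatterEntry_get? encoded p.1 p.2 out hlen j]
    cases he : encoded[j]? with
    | none => simp
    | some t =>
      by_cases ht : t = p.1
      · subst ht
        have hrest : List.lookup p.1 rest = none := lookup_eq_none_of_not_mem p.1 rest hnd.1
        simp [List.lookup, hrest]
      · have htb : (t == p.1) = false := by simp [ht]
        simp only [List.lookup, htb]
        cases List.lookup t rest <;> simp [ht]

theorem sss_alt_get? (encoded : List Int) (model smiles frag : List (Int × String))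
    (hm : (model.map Prod.fst).Nodup) (hs : (smiles.map Prod.fst).Nodup)
    (hf : (frag.map Prod.fst).Nodup) (j : Nat) :
    (sss_alt encoded model smiles frag)[j]? =
      (encoded[j]?.map (decodeTok model smiles frag)) := by
  unfold sss_alt
  have e1 : (List.replicate encoded.length (none : Option String)).length = encoded.length := by simp
  have e2 : (scatterTable (buildPos encoded) smiles (List.replicate encoded.length none)).length
      = encoded.length := (length_scatterTable ..).trans e1
  have e3 : (scatterTable (buildPos encoded) frag
        (scatterTable (buildPos encoded) smiles (List.replicate encoded.length none))).length
      = encoded.length := (length_scatterTable ..).trans e2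
  rw [List.getElem?_map,
    scatterTable_get? encoded model hm _ (le_of_eq e3.symm) j,
    scatterTable_get? encoded frag hf _ (le_of_eq e2.symm) j,
    scatterTable_get? encoded smiles hs _ (le_of_eq e1.symm) j]
  cases he : encoded[j]? with
  | none =>
    have hj : encoded.length ≤ j := by
      by_contra h
      exact absurd he (by simp [List.getElem?_eq_getElem (Nat.lt_of_not_le h)])
    simp [Nat.not_lt.mpr hj]
  | some t =>
    have hjlt : j < encoded.length := (List.getElem?_eq_some_iff.mp he).1
    cases hml : List.lookup t model <;> cases hfl : List.lookup t frag <;>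
      cases hsl : List.lookup t smiles <;>
        simp [decodeTok, hml, hfl, hsl, hjlt]

-- ===== VERDICT (by name: the statement is the Claim_ definition above) =====
theorem sss_spec : Claim_equal_sss := by
  intro encoded model smiles frag _hdom hpre
  obtain ⟨hm, hs, hf, -⟩ := hpre
  unfold Spec_sss sss
  rw [sssGo_eq_map model smiles frag encoded []]
  apply List.ext_getElem?
  intro j
  rw [sss_alt_get? encoded model smiles frag hm hs hf j]
  simp
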